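-- pv_equiv track=rewrite | github.com/ethanKim93/algorithm_group_study | 1005/박해인/5203_베이비진_게임/s1.py | is_run
-- ===== SOURCE A (Python) =====
-- def is_run(lst):
--     count = [0] * 10
--     for i in lst:
--         count[i] += 1
--     for j in range(0, 10-2):
--         if count[j] >= 1 and count[j+1] >= 1 and count[j+2] >= 1:
--             return True
--     return False
-- ===== SOURCE B (Python) =====
-- def is_run(lst):
--     s = sorted(x % 10 for x in lst)
--     run = 1
--     for a, b in zip(s, s[1:]):
--         if b == a + 1:
--             run += 1
--             if run == 3:
--                 return True
--         elif b != a: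
--             run = 1
--     return False
-- ===== Notes on version B (the rewrite author's own statement) =====
-- stated objective: alternative
-- what changed: B reduces each card mod 10 (the same residue A's count-table indexing uses on its accepted inputs), sorts, and detects a run of three consecutive digits in one linear scan, instead of building a fixed 10-slot frequency table and probing offsets j, j+1, j+2.
import Mathlib
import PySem

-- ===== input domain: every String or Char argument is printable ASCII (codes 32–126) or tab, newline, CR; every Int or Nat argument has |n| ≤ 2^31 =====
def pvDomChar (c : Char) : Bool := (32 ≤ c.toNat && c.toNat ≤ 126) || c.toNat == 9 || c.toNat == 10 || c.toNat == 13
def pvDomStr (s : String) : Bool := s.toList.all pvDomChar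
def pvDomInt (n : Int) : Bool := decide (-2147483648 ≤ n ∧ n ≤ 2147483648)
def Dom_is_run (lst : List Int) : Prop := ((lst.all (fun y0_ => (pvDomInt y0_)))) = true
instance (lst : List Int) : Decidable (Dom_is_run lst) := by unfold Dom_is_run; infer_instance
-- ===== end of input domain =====

-- B reduces each card mod 10 (the residue A's table indexing takes on every input A accepts), sorts, and scans for a run of three consecutive digits — an alternative decomposition, not claimed faster.

-- ===== PORT A =====
-- count[i] += 1 : pyGet?/pySet? return none on IndexError (element below -10 or above 9); none is threaded up (unreachable under Pre_)
def pvCountLoop (c : List Int) : List Int → Option (List Int)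
  | [] => some c
  | i :: rest =>
    match PySem.List.pyGet? c i with
    | none => none
    | some v =>
      match PySem.List.pySet? c i (v + 1) with
      | none => none
      | some c' => pvCountLoop c' rest

-- for j in range(0, 8): indices j, j+1, j+2 are always in range of the length-10 list, so pyGetD is exact here
def pvCheckLoop (c : List Int) : List Int → Bool
  | [] => false
  | j :: js =>
    if 1 ≤ PySem.List.pyGetD c j 0 ∧ 1 ≤ PySem.List.pyGetD c (j + 1) 0 ∧ 1 ≤ PySem.List.pyGetD c (j + 2) 0 then
      true
    else pvCheckLoop c js

def is_run (lst : List Int) : Bool :=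
  match pvCountLoop (List.replicate 10 0) lst with
  | none => false   -- Python raises IndexError here; excluded by Pre_
  | some c => pvCheckLoop c (PySem.List.pyRange 0 8 1)

-- ===== PORT B =====
-- the 'for a, b in zip(s, s[1:])' loop: a = previous element, run = current run length
def pvRunLoop : Int → Int → List Int → Bool
  | _, _, [] => false
  | a, run, b :: rest =>
    if b = a + 1 then
      if run + 1 = 3 then true else pvRunLoop b (run + 1) rest
    else if b ≠ a then pvRunLoop b 1 rest
    else pvRunLoop b run rest

def is_run_alt (lst : List Int) : Bool :=
  match PySem.List.sorted (lst.map (fun x => PySem.Int.mod x 10)) id false with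
  | [] => false
  | a :: rest => pvRunLoop a 1 rest

-- ===== PRECONDITION & SPEC =====
-- Pre_ is exactly the set of inputs on which Python A returns: on any element below -10 or above 9 A raises IndexError.
def Pre_is_run (lst : List Int) : Prop := ∀ x ∈ lst, -10 ≤ x ∧ x ≤ 9
instance (lst : List Int) : Decidable (Pre_is_run lst) := by unfold Pre_is_run; infer_instance
def pvWitness_is_run : List Int := [3, 1, 2, 7]

def Spec_is_run (lst : List Int) (out : Bool) : Prop := out = is_run_alt lst
instance (lst : List Int) (out : Bool) : Decidable (Spec_is_run lst out) := by unfold Spec_is_run; infer_instance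

-- ===== CLAIM (what is proved, stated in full; the proofs are below) =====
def Claim_equal_is_run : Prop := ∀ (lst : List Int), Dom_is_run lst → Pre_is_run lst → Spec_is_run lst (is_run lst)

-- ===== LEMMAS AND PROOFS =====

-- "three consecutive values occur in m": what both programs decide about the mod-10 residues
def pvHasTriple (m : List Int) : Prop := ∃ v ∈ m, v + 1 ∈ m ∧ v + 2 ∈ m

-- the condition A's table probes, phrased over the original list: slot j holds x = j or x = j - 10
def pvWrapTriple (lst : List Int) : Prop := ∃ j ∈ ([0, 1, 2, 3, 4, 5, 6, 7] : List Int),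
  (j ∈ lst ∨ j - 10 ∈ lst) ∧ (j + 1 ∈ lst ∨ j - 9 ∈ lst) ∧ (j + 2 ∈ lst ∨ j - 8 ∈ lst)

def pvSlot (i : Int) : Nat := if 0 ≤ i then i.toNat else 10 - (-i).toNat

lemma pvSlot_lt (i : Int) (h1 : -10 ≤ i) (h2 : i ≤ 9) : pvSlot i < 10 := by
  unfold pvSlot; split_ifs <;> omega

lemma pvIdx_slot (i : Int) (h1 : -10 ≤ i) (h2 : i ≤ 9) :
    PySem.List.pyIdx? 10 i = some (pvSlot i) := by
  unfold PySem.List.pyIdx? pvSlot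
  split_ifs <;> first | rfl | omega

lemma pvSlot_eq_iff (i : Int) (j : Nat) (hj : j < 10) (h1 : -10 ≤ i) (h2 : i ≤ 9) :
    pvSlot i = j ↔ (i = (j : Int) ∨ i = (j : Int) - 10) := by
  unfold pvSlot; split_ifs <;> omega

lemma countLoop_spec (lst : List Int) : ∀ (c : List Int), (∀ x ∈ lst, -10 ≤ x ∧ x ≤ 9) → c.length = 10 →
    ∃ c', pvCountLoop c lst = some c' ∧ c'.length = 10 ∧
      ∀ j : Nat, j < 10 → c'.getD j 0 = c.getD j 0 + lst.count (j : Int) + lst.count ((j : Int) - 10) := by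
  induction lst with
  | nil => intro c _ hc; exact ⟨c, rfl, hc, by simp⟩
  | cons i rest ih =>
    intro c h hc
    have hi := h i (by simp)
    have hsl : pvSlot i < 10 := pvSlot_lt i hi.1 hi.2
    have hlt : pvSlot i < c.length := by omega
    have hidx : PySem.List.pyIdx? c.length i = some (pvSlot i) := by
      rw [hc]; exact pvIdx_slot i hi.1 hi.2
    have hget : PySem.List.pyGet? c i = some (c.getD (pvSlot i) 0) := by
      simp [PySem.List.pyGet?, hidx, List.getElem?_eq_getElem hlt]
    have hsetg : ∀ v : Int, PySem.List.pySet? c i v = some (c.set (pvSlot i) v) := by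
      intro v; simp [PySem.List.pySet?, hidx]
    obtain ⟨c', hrun, hlen, hval⟩ := ih (c.set (pvSlot i) ((c.getD (pvSlot i) 0) + 1))
      (fun x hx => h x (by simp [hx])) (by simp [hc])
    refine ⟨c', ?_, hlen, ?_⟩
    · have hstep : pvCountLoop c (i :: rest) =
          pvCountLoop (c.set (pvSlot i) ((c.getD (pvSlot i) 0) + 1)) rest := by
        simp [pvCountLoop, hget, hsetg]
      rw [hstep]; exact hrun
    · intro j hj
      rw [hval j hj]
      have hjlt : j < c.length := by omega
      have hset_getD : (c.set (pvSlot i) ((c.getD (pvSlot i) 0) + 1)).getD j 0 =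
          if j = pvSlot i then c.getD (pvSlot i) 0 + 1 else c.getD j 0 := by
        split_ifs with he
        · subst he; rw [List.getD_eq_getElem _ _ (by simpa using hjlt), List.getElem_set_self]
        · rw [List.getD_eq_getElem _ _ (by simpa using hjlt), List.getElem_set_ne (by omega),
            List.getD_eq_getElem _ _ hjlt]
      rw [hset_getD, List.count_cons, List.count_cons]
      simp only [beq_iff_eq]
      push_cast
      by_cases hj2 : j = pvSlot i
      · subst hj2
        have hd : i = (pvSlot i : Int) ∨ i = (pvSlot i : Int) - 10 := (pvSlot_eq_iff i (pvSlot i) hj hi.1 hi.2).mp rfl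
        rw [if_pos rfl]
        split_ifs <;> omega
      · have hd1 : ¬((j : Int) = i) := fun hq => hj2 ((pvSlot_eq_iff i j hj hi.1 hi.2).mpr (Or.inl hq.symm)).symm
        have hd2 : ¬((j : Int) - 10 = i) := fun hq => hj2 ((pvSlot_eq_iff i j hj hi.1 hi.2).mpr (Or.inr hq.symm)).symm
        rw [if_neg hj2]
        split_ifs <;> omega

lemma checkLoop_iff (c : List Int) (js : List Int) :
    pvCheckLoop c js = true ↔ ∃ j ∈ js,
      1 ≤ PySem.List.pyGetD c j 0 ∧ 1 ≤ PySem.List.pyGetD c (j + 1) 0 ∧ 1 ≤ PySem.List.pyGetD c (j + 2) 0 := by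
  induction js with
  | nil => simp [pvCheckLoop]
  | cons j js ih =>
    by_cases h : 1 ≤ PySem.List.pyGetD c j 0 ∧ 1 ≤ PySem.List.pyGetD c (j + 1) 0 ∧ 1 ≤ PySem.List.pyGetD c (j + 2) 0
    · simp [pvCheckLoop, h]
    · simp only [pvCheckLoop, if_neg h, ih, List.mem_cons]
      constructor
      · rintro ⟨v, hv, hp⟩; exact ⟨v, Or.inr hv, hp⟩
      · rintro ⟨v, hv | hv, hp⟩
        · exact absurd (hv ▸ hp) h
        · exact ⟨v, hv, hp⟩

lemma mem_digits_iff (j : Int) : j ∈ ([0, 1, 2, 3, 4, 5, 6, 7] : List Int) ↔ 0 ≤ j ∧ j < 8 := by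
  simp
  omega

lemma mem_wrap_map (lst : List Int) (h : ∀ x ∈ lst, -10 ≤ x ∧ x ≤ 9) (j : Int)
    (h0 : 0 ≤ j) (h9 : j ≤ 9) :
    j ∈ lst.map (fun x => if x < 0 then x + 10 else x) ↔ (j ∈ lst ∨ j - 10 ∈ lst) := by
  rw [List.mem_map]
  constructor
  · rintro ⟨x, hx, hfx⟩
    by_cases hneg : x < 0
    · rw [if_pos hneg] at hfx
      exact Or.inr (by rwa [show j - 10 = x from by omega])
    · rw [if_neg hneg] at hfx
      exact Or.inl (hfx ▸ hx)
  · rintro (hm | hm)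
    · exact ⟨j, hm, by rw [if_neg (by omega)]⟩
    · exact ⟨j - 10, hm, by have := h _ hm; rw [if_pos (by omega)]; omega⟩

lemma wrap_mem_bounds (lst : List Int) (h : ∀ x ∈ lst, -10 ≤ x ∧ x ≤ 9) (v : Int)
    (hv : v ∈ lst.map (fun x => if x < 0 then x + 10 else x)) : 0 ≤ v ∧ v ≤ 9 := by
  rw [List.mem_map] at hv
  obtain ⟨x, hx, hfx⟩ := hv
  have := h x hx
  subst hfx
  split_ifs <;> omega

lemma wrapTriple_iff_mapHas (lst : List Int) (h : ∀ x ∈ lst, -10 ≤ x ∧ x ≤ 9) :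
    pvWrapTriple lst ↔ pvHasTriple (lst.map (fun x => if x < 0 then x + 10 else x)) := by
  unfold pvWrapTriple pvHasTriple
  constructor
  · rintro ⟨j, hj, m1, m2, m3⟩
    rw [mem_digits_iff] at hj
    exact ⟨j, (mem_wrap_map lst h j (by omega) (by omega)).mpr m1,
      (mem_wrap_map lst h (j + 1) (by omega) (by omega)).mpr
        (by rwa [show j + 1 - 10 = j - 9 from by ring]),
      (mem_wrap_map lst h (j + 2) (by omega) (by omega)).mpr
        (by rwa [show j + 2 - 10 = j - 8 from by ring])⟩
  · rintro ⟨v, hv, h1, h2⟩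
    have hb0 := wrap_mem_bounds lst h v hv
    have hb2 := wrap_mem_bounds lst h (v + 2) h2
    refine ⟨v, (mem_digits_iff v).mpr ⟨hb0.1, by omega⟩,
      (mem_wrap_map lst h v (by omega) (by omega)).mp hv,
      ?_, ?_⟩
    · have := (mem_wrap_map lst h (v + 1) (by omega) (by omega)).mp h1
      rcases this with hm | hm
      · exact Or.inl hm
      · exact Or.inr (by rwa [show v + 1 - 10 = v - 9 from by ring] at hm)
    · have := (mem_wrap_map lst h (v + 2) (by omega) (by omega)).mp h2
      rcases this with hm | hm
      · exact Or.inl hm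
      · exact Or.inr (by rwa [show v + 2 - 10 = v - 8 from by ring] at hm)

lemma is_run_iff (lst : List Int) (h : ∀ x ∈ lst, -10 ≤ x ∧ x ≤ 9) :
    is_run lst = true ↔ pvWrapTriple lst := by
  obtain ⟨c', hrun, hlen, hval⟩ := countLoop_spec lst (List.replicate 10 0) h (by simp)
  have hcount : ∀ j : Nat, j < 10 → c'.getD j 0 = lst.count (j : Int) + lst.count ((j : Int) - 10) := by
    intro j hj
    rw [hval j hj]
    have : (List.replicate 10 (0 : Int)).getD j 0 = 0 := by interval_cases j <;> simp
    omega
  have hmem : ∀ j : Int, 0 ≤ j → j < 10 →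
      (1 ≤ PySem.List.pyGetD c' j 0 ↔ (j ∈ lst ∨ j - 10 ∈ lst)) := by
    intro j h0 h10
    have hcast : ((j.toNat : Nat) : Int) = j := Int.toNat_of_nonneg h0
    conv_lhs => rw [← hcast]
    rw [PySem.List.pyGetD_natCast, hcount j.toNat (by omega), hcast]
    constructor
    · intro h1
      by_cases hc1 : 0 < lst.count j
      · exact Or.inl (List.count_pos_iff.mp hc1)
      · have : 0 < lst.count (j - 10) := by omega
        exact Or.inr (List.count_pos_iff.mp this)
    · rintro (hm | hm)
      · have := List.count_pos_iff.mpr hm; omega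
      · have := List.count_pos_iff.mpr hm; omega
  unfold is_run pvWrapTriple
  rw [hrun, checkLoop_iff]
  constructor
  · rintro ⟨j, hj, h1, h2, h3⟩
    rw [PySem.List.mem_pyRange_one] at hj
    refine ⟨j, (mem_digits_iff j).mpr hj, (hmem j hj.1 (by omega)).mp h1,
      ?_, ?_⟩
    · have := (hmem (j + 1) (by omega) (by omega)).mp h2
      rcases this with hm | hm
      · exact Or.inl hm
      · exact Or.inr (by rwa [show j + 1 - 10 = j - 9 from by ring] at hm)
    · have := (hmem (j + 2) (by omega) (by omega)).mp h3
      rcases this with hm | hm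
      · exact Or.inl hm
      · exact Or.inr (by rwa [show j + 2 - 10 = j - 8 from by ring] at hm)
  · rintro ⟨j, hj, m1, m2, m3⟩
    rw [mem_digits_iff] at hj
    refine ⟨j, PySem.List.mem_pyRange_one.mpr hj, (hmem j hj.1 (by omega)).mpr m1,
      (hmem (j + 1) (by omega) (by omega)).mpr ?_, (hmem (j + 2) (by omega) (by omega)).mpr ?_⟩
    · rcases m2 with hm | hm
      · exact Or.inl hm
      · exact Or.inr (by rwa [show j + 1 - 10 = j - 9 from by ring])
    · rcases m3 with hm | hm
      · exact Or.inl hm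
      · exact Or.inr (by rwa [show j + 2 - 10 = j - 8 from by ring])

lemma runLoop_iff (rest : List Int) : ∀ (a run : Int), List.Pairwise (· ≤ ·) (a :: rest) → (run = 1 ∨ run = 2) →
    (pvRunLoop a run rest = true ↔
      ((a + 1 ∈ rest ∧ (run = 2 ∨ a + 2 ∈ rest)) ∨ ∃ v ∈ rest, v + 1 ∈ rest ∧ v + 2 ∈ rest)) := by
  induction rest with
  | nil => intro a run _ _; simp [pvRunLoop]
  | cons b t ih =>
    intro a run hp hrun
    have hab : a ≤ b := (List.pairwise_cons.mp hp).1 b (by simp)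
    have hbt : ∀ x ∈ t, b ≤ x := (List.pairwise_cons.mp ((List.pairwise_cons.mp hp).2)).1
    have hpt : List.Pairwise (· ≤ ·) (b :: t) := (List.pairwise_cons.mp hp).2
    have hne12 : ¬((1:Int) = 2) := by norm_num
    have hred : ∀ x : Int, b < x → (x ∈ b :: t ↔ x ∈ t) := by
      intro x hx
      constructor
      · intro hm; rcases List.mem_cons.mp hm with he | hm'
        · omega
        · exact hm'
      · intro hm; exact List.mem_cons.mpr (Or.inr hm)
    have hexred : ((∃ v ∈ b :: t, v + 1 ∈ b :: t ∧ v + 2 ∈ b :: t) ↔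
        ((b + 1 ∈ t ∧ b + 2 ∈ t) ∨ ∃ v ∈ t, v + 1 ∈ t ∧ v + 2 ∈ t)) := by
      constructor
      · rintro ⟨v, hv, h1, h2⟩
        rcases List.mem_cons.mp hv with he | hvt
        · subst he
          exact Or.inl ⟨(hred _ (by omega)).mp h1, (hred _ (by omega)).mp h2⟩
        · have hbv : b ≤ v := hbt v hvt
          exact Or.inr ⟨v, hvt, (hred _ (by omega)).mp h1, (hred _ (by omega)).mp h2⟩
      · rintro (⟨h1, h2⟩ | ⟨v, hv, h1, h2⟩)
        · exact ⟨b, List.mem_cons_self, List.mem_cons.mpr (Or.inr h1), List.mem_cons.mpr (Or.inr h2)⟩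
        · exact ⟨v, List.mem_cons.mpr (Or.inr hv), List.mem_cons.mpr (Or.inr h1), List.mem_cons.mpr (Or.inr h2)⟩
    by_cases h1 : b = a + 1
    · subst h1
      rcases hrun with hr | hr <;> subst hr
      · have hstep : pvRunLoop a 1 ((a + 1) :: t) = pvRunLoop (a + 1) 2 t := by
          rw [pvRunLoop, if_pos rfl, if_neg (by norm_num)]
          norm_num
        have hih := ih (a + 1) 2 hpt (Or.inr rfl)
        rw [show a + 1 + 1 = a + 2 from by ring, show a + 1 + 2 = a + 3 from by ring] at hih
        rw [show a + 1 + 1 = a + 2 from by ring, show a + 1 + 2 = a + 3 from by ring] at hexred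
        have hself : a + 1 ∈ (a + 1) :: t := List.mem_cons_self
        have e2 : a + 2 ∈ (a + 1) :: t ↔ a + 2 ∈ t := hred _ (by omega)
        rw [hstep, hih]
        constructor
        · rintro (⟨hm, -⟩ | hex)
          · exact Or.inl ⟨hself, Or.inr (e2.mpr hm)⟩
          · exact Or.inr (hexred.mpr (Or.inr hex))
        · rintro (⟨-, h | hm⟩ | hex)
          · exact absurd h hne12
          · exact Or.inl ⟨e2.mp hm, Or.inl rfl⟩
          · rcases hexred.mp hex with ⟨hm2, hm3⟩ | hext
            · exact Or.inl ⟨hm2, Or.inr hm3⟩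
            · exact Or.inr hext
      · have hstep : pvRunLoop a 2 ((a + 1) :: t) = true := by
          rw [pvRunLoop, if_pos rfl, if_pos (by norm_num)]
        rw [hstep]
        have hself : a + 1 ∈ (a + 1) :: t := List.mem_cons_self
        constructor
        · intro _; exact Or.inl ⟨hself, Or.inl rfl⟩
        · intro _; rfl
    · by_cases h2 : b = a
      · subst h2
        have hstep : pvRunLoop b run (b :: t) = pvRunLoop b run t := by
          rw [pvRunLoop, if_neg (by omega), if_neg (by simp)]
        have hih := ih b run hpt hrun
        have e1 : b + 1 ∈ b :: t ↔ b + 1 ∈ t := hred _ (by omega)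
        have e2 : b + 2 ∈ b :: t ↔ b + 2 ∈ t := hred _ (by omega)
        rw [hstep, hih]
        constructor
        · rintro (⟨hm, hor⟩ | hex)
          · refine Or.inl ⟨e1.mpr hm, ?_⟩
            rcases hor with h | h
            · exact Or.inl h
            · exact Or.inr (e2.mpr h)
          · exact Or.inr (hexred.mpr (Or.inr hex))
        · rintro (⟨hm, hor⟩ | hex)
          · refine Or.inl ⟨e1.mp hm, ?_⟩
            rcases hor with h | h
            · exact Or.inl h
            · exact Or.inr (e2.mp h)
          · rcases hexred.mp hex with ⟨hm2, hm3⟩ | hext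
            · exact Or.inl ⟨hm2, Or.inr hm3⟩
            · exact Or.inr hext
      · have hb2 : a + 2 ≤ b := by omega
        have hstep : pvRunLoop a run (b :: t) = pvRunLoop b 1 t := by
          rw [pvRunLoop, if_neg h1, if_pos h2]
        have hih := ih b 1 hpt (Or.inl rfl)
        have hna : ¬(a + 1 ∈ b :: t) := by
          intro hm
          rcases List.mem_cons.mp hm with he | hm'
          · omega
          · exact absurd (hbt _ hm') (by omega)
        rw [hstep, hih]
        constructor
        · rintro (⟨hm, h | hm2⟩ | hex)
          · exact absurd h hne12
          · exact Or.inr (hexred.mpr (Or.inl ⟨hm, hm2⟩))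
          · exact Or.inr (hexred.mpr (Or.inr hex))
        · rintro (⟨hm, -⟩ | hex)
          · exact absurd hm hna
          · rcases hexred.mp hex with ⟨hm2, hm3⟩ | hext
            · exact Or.inl ⟨hm2, Or.inr hm3⟩
            · exact Or.inr hext

-- B's sort-and-scan on any list m decides exactly "m contains three consecutive values"
lemma scan_iff (m : List Int) :
    (match PySem.List.sorted m id false with
     | [] => false
     | a :: rest => pvRunLoop a 1 rest) = true ↔ pvHasTriple m := by
  unfold pvHasTriple
  have hperm : (PySem.List.sorted m id false).Perm m := PySem.List.sorted_perm m id false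
  have hmem : ∀ x : Int, x ∈ m ↔ x ∈ PySem.List.sorted m id false :=
    fun x => (hperm.mem_iff).symm
  have hpw : List.Pairwise (· ≤ ·) (PySem.List.sorted m id false) := by
    have := PySem.List.sorted_pairwise (xs := m) (key := (id : Int → Int))
    simpa using this
  cases hs : PySem.List.sorted m id false with
  | nil =>
    have : m = [] := (hs ▸ hperm).symm.eq_nil
    simp [this]
  | cons a rest =>
    rw [hs] at hmem hpw
    have hat : ∀ x ∈ rest, a ≤ x := (List.pairwise_cons.mp hpw).1
    have hred : ∀ x : Int, a < x → (x ∈ a :: rest ↔ x ∈ rest) := by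
      intro x hx
      constructor
      · intro hm
        rcases List.mem_cons.mp hm with he | hm'
        · omega
        · exact hm'
      · intro hm; exact List.mem_cons.mpr (Or.inr hm)
    rw [runLoop_iff rest a 1 hpw (Or.inl rfl)]
    constructor
    · rintro (⟨h1, h | h2⟩ | ⟨v, hv, h1, h2⟩)
      · exact absurd h (by norm_num)
      · exact ⟨a, (hmem a).mpr List.mem_cons_self, (hmem _).mpr (List.mem_cons.mpr (Or.inr h1)),
          (hmem _).mpr (List.mem_cons.mpr (Or.inr h2))⟩
      · have hav : a ≤ v := hat v hv
        exact ⟨v, (hmem v).mpr (List.mem_cons.mpr (Or.inr hv)),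
          (hmem _).mpr (List.mem_cons.mpr (Or.inr h1)), (hmem _).mpr (List.mem_cons.mpr (Or.inr h2))⟩
    · rintro ⟨v, hv, h1, h2⟩
      rw [hmem] at hv h1 h2
      rcases List.mem_cons.mp hv with he | hvt
      · subst he
        exact Or.inl ⟨(hred _ (by omega)).mp h1, Or.inr ((hred _ (by omega)).mp h2)⟩
      · have hav : a ≤ v := hat v hvt
        exact Or.inr ⟨v, hvt, (hred _ (by omega)).mp h1, (hred _ (by omega)).mp h2⟩

-- under Pre_, x % 10 is exactly the wrap A's table indexing performs
lemma map_mod_eq_wrap (lst : List Int) (h : ∀ x ∈ lst, -10 ≤ x ∧ x ≤ 9) :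
    lst.map (fun x => PySem.Int.mod x 10) = lst.map (fun x => if x < 0 then x + 10 else x) := by
  apply List.map_congr_left
  intro x hx
  have hb := h x hx
  rw [PySem.Int.mod_eq_emod_of_pos (by norm_num)]
  split_ifs <;> omega

-- ===== VERDICT (by name: the statement is the Claim_ definition above) =====
theorem is_run_spec : Claim_equal_is_run := by
  intro lst _ hpre
  have hA := is_run_iff lst hpre
  have hW := wrapTriple_iff_mapHas lst hpre
  have hB := scan_iff (lst.map (fun x => PySem.Int.mod x 10))
  unfold Spec_is_run is_run_alt
  rw [map_mod_eq_wrap lst hpre] at hB ⊢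
  have hfin : is_run lst = true ↔
      (match PySem.List.sorted (lst.map (fun x => if x < 0 then x + 10 else x)) id false with
       | [] => false
       | a :: rest => pvRunLoop a 1 rest) = true := by
    rw [hA, hB]; exact hW
  cases h1 : is_run lst
  · cases h2 : (match PySem.List.sorted (lst.map (fun x => if x < 0 then x + 10 else x)) id false with
       | [] => false
       | a :: rest => pvRunLoop a 1 rest) <;> simp_all
  · simp_all
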